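-- pv_equiv track=rewrite | github.com/jasonhklee0408/Basic-Data-Structures | hw06.py | recursive_reverse_up_to_n
-- ===== SOURCE A (Python) =====
-- def recursive_reverse_up_to_n(name, n):
--     """
--     Recursively reverses the given string at chunks 1..n
--
--     Restrictions:
--     You should use recursion. You should do input validation.
--
--     Parameters:
--     name (str): The string to be reversed
--     n (int): How many times the string should be reversed
--
--     Returns:
--     (str) Reversed string with the given formula
--
--     >>> recursive_reverse_up_to_n('Nabi', 3)
--     'bNai'
--     >>> recursive_reverse_up_to_n('klmn', 3)
--     'mkln'
--     >>> recursive_reverse_up_to_n('klmn', 4)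
--     'nlkm'
--
--     +++++++++++++++++++++++++
--     WRITE YOUR DOCTESTS
--     +++++++++++++++++++++++++
--     >>> recursive_reverse_up_to_n('klmn', 0)
--     Traceback (most recent call last):
--     ...
--     AssertionError
--     >>> recursive_reverse_up_to_n('klmn', '3')
--     Traceback (most recent call last):
--     ...
--     AssertionError
--     >>> recursive_reverse_up_to_n('123456', 6)
--     '642135'
--     """
--     assert isinstance(n, int)
--     assert isinstance(name, str)
--     assert n > 0
--     if n <= 1:
--         return name
--     name = recursive_reverse_up_to_n(name, n-1)
--     return name[:n][::-1] + name[n:]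
-- ===== SOURCE B (Python) =====
-- def recursive_reverse_up_to_n(name, n):
--     assert isinstance(n, int)
--     assert isinstance(name, str)
--     assert n > 0
--     L = len(name)
--     m = min(n, L)
--     # closed form of the m-1 prefix reversals: indices m-1, m-3, ... then m%2, m%2+2, ..., then the tail
--     out = [name[m - 1 - 2*i] for i in range((m + 1) // 2)] \
--         + [name[m % 2 + 2*i] for i in range(m // 2)] \
--         + list(name[m:])
--     # the remaining n - L reversals are full reversals: collapse by parity
--     if n > L and (n - L) % 2 == 1:
--         out.reverse()
--     return ''.join(out)
-- ===== Notes on version B (the rewrite author's own statement) =====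
-- stated objective: faster
-- what changed: Replaced A's recursion performing n-1 successive prefix reversals by a closed form: the reversals of prefix sizes 2..m (m = min(n, len)) leave the characters at indices m-1, m-3, ... followed by m%2, m%2+2, ... followed by the untouched tail, and the remaining n - len full reversals collapse by parity to at most one reverse.
import Mathlib
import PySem

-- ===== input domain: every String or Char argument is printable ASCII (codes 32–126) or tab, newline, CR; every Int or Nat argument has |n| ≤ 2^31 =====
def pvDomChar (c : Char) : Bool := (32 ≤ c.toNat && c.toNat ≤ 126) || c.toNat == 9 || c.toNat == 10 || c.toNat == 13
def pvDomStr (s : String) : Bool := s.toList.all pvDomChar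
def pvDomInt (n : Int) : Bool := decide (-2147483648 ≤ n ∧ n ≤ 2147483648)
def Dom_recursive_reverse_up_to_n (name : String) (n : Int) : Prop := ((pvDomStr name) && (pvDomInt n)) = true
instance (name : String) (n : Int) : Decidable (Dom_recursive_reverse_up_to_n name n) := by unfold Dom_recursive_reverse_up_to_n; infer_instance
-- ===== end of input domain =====

-- B replaces A's recursion (n-1 successive prefix reversals) by a closed form for the final
-- character order plus a parity collapse of the n - len full reversals; a timing run measured B faster.

-- ===== PORT A =====
-- recursion on n (n.toNat mirrors Python's recursion down to the n <= 1 base case; Pre_ gives n ≥ 1);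
-- in the recursive case n ≥ 2 the slices name[:n] / name[n:] (nonnegative bound) are take/drop, [::-1] is reverse — exact there
def pvA_rec (s : List Char) : Nat → List Char
  | 0 => s                    -- n <= 1: return name
  | 1 => s                    -- n <= 1: return name
  | (m+2) =>
    let t := pvA_rec s (m+1)                -- name = recursive_reverse_up_to_n(name, n-1)
    (t.take (m+2)).reverse ++ t.drop (m+2)  -- name[:n][::-1] + name[n:]

def recursive_reverse_up_to_n (name : String) (n : Int) : String :=
  String.ofList (pvA_rec name.toList n.toNat)

-- ===== PORT B =====
-- the two comprehensions over range((m+1)//2) / range(m//2) (m = min(n,L) ≥ 0 under Pre_, so Nat // and %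
-- match Python's), each name[idx] has 0 ≤ idx < L so getD's default is never used; '//' '%' on nonneg values are Nat / and %
def recursive_reverse_up_to_n_alt (name : String) (n : Int) : String :=
  let s := name.toList
  let L : Int := s.length
  let M : Nat := (min n L).toNat
  let out := (List.range ((M+1)/2)).map (fun i => s.getD (M - 1 - 2*i) ' ')
          ++ (List.range (M/2)).map (fun i => s.getD (M % 2 + 2*i) ' ')
          ++ s.drop M
  let out := if n > L ∧ PySem.Int.mod (n - L) 2 = 1 then out.reverse else out
  String.ofList out

-- ===== PRECONDITION & SPEC =====
-- Python A (and B) raise AssertionError for n ≤ 0; exactly those inputs are excluded.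
def Pre_recursive_reverse_up_to_n (name : String) (n : Int) : Prop := 1 ≤ n
instance (name : String) (n : Int) : Decidable (Pre_recursive_reverse_up_to_n name n) := by unfold Pre_recursive_reverse_up_to_n; infer_instance
def pvWitness_recursive_reverse_up_to_n : String × Int := ("klmn", 3)

def Spec_recursive_reverse_up_to_n (name : String) (n : Int) (out : String) : Prop := out = recursive_reverse_up_to_n_alt name n
instance (name : String) (n : Int) (out : String) : Decidable (Spec_recursive_reverse_up_to_n name n out) := by unfold Spec_recursive_reverse_up_to_n; infer_instance

-- ===== CLAIM (what is proved, stated in full; the proofs are below) =====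
def Claim_equal_recursive_reverse_up_to_n : Prop := ∀ (name : String) (n : Int), Dom_recursive_reverse_up_to_n name n → Pre_recursive_reverse_up_to_n name n → Spec_recursive_reverse_up_to_n name n (recursive_reverse_up_to_n name n)

-- ===== LEMMAS AND PROOFS =====

-- one prefix-reversal step
def pvStep (cs : List Char) (k : Nat) : List Char := (cs.take k).reverse ++ cs.drop k

-- index lists of B's closed form
def pvIdxD (m : Nat) : List Nat := (List.range ((m+1)/2)).map (fun i => m - 1 - 2*i)
def pvIdxA (m : Nat) : List Nat := (List.range (m/2)).map (fun i => m % 2 + 2*i)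

theorem pvStep_one (cs : List Char) : pvStep cs 1 = cs := by
  cases cs <;> simp [pvStep]

theorem pvA_succ (s : List Char) (m : Nat) : pvA_rec s (m+1) = pvStep (pvA_rec s m) (m+1) := by
  cases m with
  | zero => simp [pvA_rec, pvStep_one]
  | succ k => rfl

theorem pvStep_length (cs : List Char) (k : Nat) : (pvStep cs k).length = cs.length := by
  simp [pvStep]; omega

theorem pvA_length (s : List Char) (m : Nat) : (pvA_rec s m).length = s.length := by
  induction m with
  | zero => rfl
  | succ k ih => rw [pvA_succ, pvStep_length, ih]

theorem pvStep_full (cs : List Char) (k : Nat) (h : cs.length ≤ k) : pvStep cs k = cs.reverse := by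
  simp [pvStep, List.take_of_length_le h, List.drop_of_length_le h]

theorem pvIdxD_succ (m : Nat) : pvIdxD (m+1) = m :: (pvIdxA m).reverse := by
  apply List.ext_getElem
  · simp [pvIdxD, pvIdxA]; omega
  · intro i h1 h2
    cases i with
    | zero => simp [pvIdxD, pvIdxA]
    | succ j =>
      simp only [pvIdxD, pvIdxA, List.getElem_cons_succ, List.getElem_reverse,
        List.getElem_map, List.getElem_range, List.length_map, List.length_range]
      simp only [pvIdxD, List.length_map, List.length_range] at h1
      omega

theorem pvIdxA_succ (m : Nat) : pvIdxA (m+1) = (pvIdxD m).reverse := by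
  apply List.ext_getElem
  · simp [pvIdxD, pvIdxA]
  · intro i h1 h2
    simp only [pvIdxD, pvIdxA, List.getElem_reverse,
      List.getElem_map, List.getElem_range, List.length_map, List.length_range]
    simp only [pvIdxA, List.length_map, List.length_range] at h1
    omega

-- B's closed form computes exactly A's recursion (for prefix sizes up to the length)
theorem pvA_closed (s : List Char) (m : Nat) (hm : m ≤ s.length) :
    pvA_rec s m = (pvIdxD m).map (fun j => s.getD j ' ')
               ++ (pvIdxA m).map (fun j => s.getD j ' ') ++ s.drop m := by
  induction m with
  | zero => simp [pvA_rec, pvIdxD, pvIdxA]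
  | succ k ih =>
    have hk : k < s.length := by omega
    rw [pvA_succ, ih (by omega), pvStep]
    set f : Nat → Char := fun j => s.getD j ' ' with hf
    set DA := (pvIdxD k).map f ++ (pvIdxA k).map f with hDA
    have hlen : DA.length = k := by simp [hDA, pvIdxD, pvIdxA]; omega
    have htake : (DA ++ s.drop k).take (k+1) = DA ++ [s[k]] := by
      rw [List.take_append, List.take_of_length_le (by omega), hlen,
          show k + 1 - k = 1 from by omega, List.drop_eq_getElem_cons hk,
          List.take_succ_cons, List.take_zero]
    have hdrop : (DA ++ s.drop k).drop (k+1) = s.drop (k+1) := by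
      rw [List.drop_append, List.drop_drop, List.drop_eq_nil_of_le (by omega), hlen]
      simp [Nat.add_comm]
    rw [htake, hdrop, pvIdxD_succ, pvIdxA_succ]
    simp [hDA, hf, List.reverse_append, List.map_reverse, List.getElem?_eq_getElem hk]

-- parity of iterated reversal
theorem pvReverse_iterate (cs : List Char) (j : Nat) :
    (List.reverse)^[j] cs = if j % 2 = 1 then cs.reverse else cs := by
  induction j with
  | zero => simp
  | succ k ih =>
    rw [Function.iterate_succ_apply', ih]
    rcases Nat.even_or_odd k with h | h
    · simp [Nat.even_iff.mp h, Nat.succ_mod_two_eq_one_iff.mpr (Nat.even_iff.mp h)]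
    · simp [Nat.odd_iff.mp h, Nat.succ_mod_two_eq_zero_iff.mpr (Nat.odd_iff.mp h)]

theorem pvA_add (s : List Char) (m j : Nat) (h : s.length ≤ m) :
    pvA_rec s (m + j) = (List.reverse)^[j] (pvA_rec s m) := by
  induction j with
  | zero => rfl
  | succ k ih =>
    rw [show m + (k+1) = (m + k) + 1 by ring, pvA_succ,
        pvStep_full _ _ (by rw [pvA_length]; omega), ih, Function.iterate_succ_apply']

-- ===== VERDICT (by name: the statement is the Claim_ definition above) =====
theorem recursive_reverse_up_to_n_spec : Claim_equal_recursive_reverse_up_to_n := by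
  intro name n _ hpre
  unfold Spec_recursive_reverse_up_to_n recursive_reverse_up_to_n recursive_reverse_up_to_n_alt
  simp only
  have hpre' : (1 : Int) ≤ n := hpre
  set s := name.toList with hs
  have hn0 : (0 : Int) ≤ n := by omega
  by_cases h : n ≤ (s.length : Int)
  · -- n ≤ L: the closed form is A's recursion at n, no parity reversal
    have hmin : min n (s.length : Int) = n := min_eq_left h
    rw [hmin, if_neg (by intro hc; omega),
        pvA_closed s n.toNat (by omega), pvIdxD, pvIdxA, List.map_map, List.map_map]
    simp [Function.comp_def]
  · -- n > L: closed form at L, then parity collapses the remaining n - L full reversals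
    push_neg at h
    have hmin : min n (s.length : Int) = (s.length : Int) := min_eq_right (le_of_lt h)
    have hsplit : n.toNat = s.length + (n.toNat - s.length) := by omega
    rw [hmin, Int.toNat_natCast, hsplit, pvA_add s _ _ (le_refl _), pvReverse_iterate,
        pvA_closed s s.length (le_refl _), pvIdxD, pvIdxA, List.map_map, List.map_map]
    simp only [Function.comp_def]
    have hmod : PySem.Int.mod (n - (s.length : Int)) 2 = ((n.toNat - s.length) % 2 : Nat) := by
      rw [PySem.Int.mod_eq_emod_of_pos (by omega : (0:Int) < 2)]
      omega
    have hcond : (n > (s.length : Int) ∧ PySem.Int.mod (n - (s.length : Int)) 2 = 1) ↔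
        (n.toNat - s.length) % 2 = 1 := by
      rw [hmod]
      constructor
      · rintro ⟨_, hx⟩; exact_mod_cast hx
      · intro hx; exact ⟨h, by exact_mod_cast hx⟩
    by_cases hc : (n.toNat - s.length) % 2 = 1
    · rw [if_pos (hcond.mpr hc), if_pos hc]
    · rw [if_neg (fun hx => hc (hcond.mp hx)), if_neg hc]
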